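-- pv_equiv track=rewrite | github.com/ChetanDongre2004/autopsy-ai | backend/routes/repo_analyzer.py | classify_file_role
-- ===== SOURCE A (Python) =====
-- def classify_file_role(path: str) -> str:
--     p = path.lower()
--     if any(k in p for k in ["test", "spec", "__test__"]):
--         return "test"
--     if any(k in p for k in ["controller", "handler", "endpoint", "view"]):
--         return "controller"
--     if any(k in p for k in ["service", "usecase", "interactor"]):
--         return "service"
--     if any(k in p for k in ["model", "schema", "entity", "dto"]):
--         return "model"
--     if any(k in p for k in ["util", "helper", "lib", "common", "shared"]):
--         return "utility"
--     if any(k in p for k in ["middleware", "guard", "interceptor"]):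
--         return "middleware"
--     if any(k in p for k in ["config", "setting"]):
--         return "config"
--     if any(k in p for k in ["route", "router", "url"]):
--         return "routing"
--     if any(k in p for k in ["migration", "seed"]):
--         return "database"
--     if any(k in p for k in ["component", "page", "widget"]):
--         return "ui-component"
--     return "source"
-- ===== SOURCE B (Python) =====
-- ROLES = ["test", "controller", "service", "model", "utility",
--          "middleware", "config", "routing", "database", "ui-component"]
--
-- KEYWORDS = [
--     ("test", 0), ("spec", 0), ("__test__", 0),
--     ("controller", 1), ("handler", 1), ("endpoint", 1), ("view", 1),
--     ("service", 2), ("usecase", 2), ("interactor", 2),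
--     ("model", 3), ("schema", 3), ("entity", 3), ("dto", 3),
--     ("util", 4), ("helper", 4), ("lib", 4), ("common", 4), ("shared", 4),
--     ("middleware", 5), ("guard", 5), ("interceptor", 5),
--     ("config", 6), ("setting", 6),
--     ("route", 7), ("router", 7), ("url", 7),
--     ("migration", 8), ("seed", 8),
--     ("component", 9), ("page", 9), ("widget", 9),
-- ]
--
-- def classify_file_role(path: str) -> str:
--     # One left-to-right scan over the path's positions: at each position,
--     # lower the best (smallest) priority of any keyword starting there;
--     # the answer is the role of the best priority seen, default "source".
--     p = path.lower()
--     best = len(ROLES)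
--     for i in range(len(p) + 1):
--         for kw, pr in KEYWORDS:
--             if pr < best and p.startswith(kw, i):
--                 best = pr
--     return ROLES[best] if best < len(ROLES) else "source"
-- ===== Notes on version B (the rewrite author's own statement) =====
-- stated objective: alternative
-- what changed: Instead of testing ten keyword groups in priority order with substring searches, B makes one scan over the path's positions against a flat keyword->priority table, keeping the minimum matched priority and mapping it to its role at the end.
import Mathlib
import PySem

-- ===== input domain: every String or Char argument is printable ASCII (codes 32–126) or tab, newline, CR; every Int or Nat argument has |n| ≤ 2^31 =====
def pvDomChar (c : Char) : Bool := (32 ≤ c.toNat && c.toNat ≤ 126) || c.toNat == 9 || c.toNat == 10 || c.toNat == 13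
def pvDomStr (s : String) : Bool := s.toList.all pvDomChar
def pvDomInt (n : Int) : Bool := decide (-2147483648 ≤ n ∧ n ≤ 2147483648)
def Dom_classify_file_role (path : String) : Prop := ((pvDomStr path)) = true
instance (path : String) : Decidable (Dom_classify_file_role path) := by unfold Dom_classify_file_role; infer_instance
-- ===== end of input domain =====

-- B replaces A's ten ordered category checks by a single scan over the path's positions
-- with a flat keyword->priority table and a running minimum (alternative algorithm, not faster).


-- ===== PORT A =====
-- 'k in p' (substring test) is PySem.Str.isIn; 'any(... for k in [...])' is List.any over the literal list.
def classify_file_role (path : String) : String :=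
  let p := PySem.Str.lower path
  if (["test", "spec", "__test__"].any (fun k => PySem.Str.isIn k p)) then "test"
  else if (["controller", "handler", "endpoint", "view"].any (fun k => PySem.Str.isIn k p)) then "controller"
  else if (["service", "usecase", "interactor"].any (fun k => PySem.Str.isIn k p)) then "service"
  else if (["model", "schema", "entity", "dto"].any (fun k => PySem.Str.isIn k p)) then "model"
  else if (["util", "helper", "lib", "common", "shared"].any (fun k => PySem.Str.isIn k p)) then "utility"
  else if (["middleware", "guard", "interceptor"].any (fun k => PySem.Str.isIn k p)) then "middleware"
  else if (["config", "setting"].any (fun k => PySem.Str.isIn k p)) then "config"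
  else if (["route", "router", "url"].any (fun k => PySem.Str.isIn k p)) then "routing"
  else if (["migration", "seed"].any (fun k => PySem.Str.isIn k p)) then "database"
  else if (["component", "page", "widget"].any (fun k => PySem.Str.isIn k p)) then "ui-component"
  else "source"

-- ===== PORT B =====
-- B's ROLES list and flat (keyword, priority) table.
def pvRoles : List String :=
  ["test", "controller", "service", "model", "utility",
   "middleware", "config", "routing", "database", "ui-component"]

def pvKw : List (String × Nat) :=
  [("test", 0), ("spec", 0), ("__test__", 0),
   ("controller", 1), ("handler", 1), ("endpoint", 1), ("view", 1),
   ("service", 2), ("usecase", 2), ("interactor", 2),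
   ("model", 3), ("schema", 3), ("entity", 3), ("dto", 3),
   ("util", 4), ("helper", 4), ("lib", 4), ("common", 4), ("shared", 4),
   ("middleware", 5), ("guard", 5), ("interceptor", 5),
   ("config", 6), ("setting", 6),
   ("route", 7), ("router", 7), ("url", 7),
   ("migration", 8), ("seed", 8),
   ("component", 9), ("page", 9), ("widget", 9)]

-- p.startswith(kw, i) on ASCII ≡ kw.toList.isPrefixOf (p.toList.drop i); the two for-loops
-- become two nested foldl's over range(len(p)+1) and the keyword table, carrying 'best'.
def classify_file_role_alt (path : String) : String :=
  let pl := (PySem.Str.lower path).toList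
  let best := (List.range (pl.length + 1)).foldl
      (fun b i => pvKw.foldl
        (fun b kq => if kq.2 < b ∧ kq.1.toList.isPrefixOf (pl.drop i) then kq.2 else b) b)
      pvRoles.length
  if best < pvRoles.length then pvRoles.getD best "source" else "source"

-- ===== PRECONDITION & SPEC =====
def Spec_classify_file_role (path : String) (out : String) : Prop := out = classify_file_role_alt path
instance (path : String) (out : String) : Decidable (Spec_classify_file_role path out) := by unfold Spec_classify_file_role; infer_instance

-- ===== CLAIM (what is proved, stated in full; the proofs are below) =====
def Claim_equal_classify_file_role : Prop := ∀ (path : String), Dom_classify_file_role path → Spec_classify_file_role path (classify_file_role path)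

-- ===== LEMMAS AND PROOFS =====

-- category predicate, as A tests it (on the list side)
def pvF (pl : List Char) : Nat → Bool
  | 0 => ["test", "spec", "__test__"].any (fun k => PySem.Chars.isIn k.toList pl)
  | 1 => ["controller", "handler", "endpoint", "view"].any (fun k => PySem.Chars.isIn k.toList pl)
  | 2 => ["service", "usecase", "interactor"].any (fun k => PySem.Chars.isIn k.toList pl)
  | 3 => ["model", "schema", "entity", "dto"].any (fun k => PySem.Chars.isIn k.toList pl)
  | 4 => ["util", "helper", "lib", "common", "shared"].any (fun k => PySem.Chars.isIn k.toList pl)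
  | 5 => ["middleware", "guard", "interceptor"].any (fun k => PySem.Chars.isIn k.toList pl)
  | 6 => ["config", "setting"].any (fun k => PySem.Chars.isIn k.toList pl)
  | 7 => ["route", "router", "url"].any (fun k => PySem.Chars.isIn k.toList pl)
  | 8 => ["migration", "seed"].any (fun k => PySem.Chars.isIn k.toList pl)
  | 9 => ["component", "page", "widget"].any (fun k => PySem.Chars.isIn k.toList pl)
  | _ => false

def pvHit (pl : List Char) (iq : Nat × (String × Nat)) : Bool :=
  iq.2.1.toList.isPrefixOf (pl.drop iq.1)

def pvPairs (pl : List Char) : List (Nat × (String × Nat)) :=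
  (List.range (pl.length + 1)).flatMap (fun i => pvKw.map (fun q => (i, q)))

def pvBest (pl : List Char) : Nat :=
  (List.range (pl.length + 1)).foldl
      (fun b i => pvKw.foldl
        (fun b kq => if kq.2 < b ∧ kq.1.toList.isPrefixOf (pl.drop i) then kq.2 else b) b)
      pvRoles.length

lemma foldl_nest {α β γ : Type} (f : γ → α → β → γ) (l1 : List α) (l2 : List β) (c : γ) :
    l1.foldl (fun c a => l2.foldl (fun c b => f c a b) c) c
      = (l1.flatMap (fun a => l2.map (fun b => (a, b)))).foldl (fun c ab => f c ab.1 ab.2) c := by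
  induction l1 generalizing c with
  | nil => rfl
  | cons a t ih => simp [List.foldl_append, List.foldl_map, ih]

lemma foldl_step_filter (pl : List Char) (P : List (Nat × (String × Nat))) :
    ∀ b, P.foldl (fun b iq => if iq.2.2 < b ∧ pvHit pl iq then iq.2.2 else b) b
      = (P.filter (pvHit pl)).foldl (fun m iq => min m iq.2.2) b := by
  induction P with
  | nil => intro b; rfl
  | cons q t ih =>
    intro b
    by_cases h : pvHit pl q = true
    · simp only [List.foldl_cons, List.filter_cons, h, if_pos, ih]
      congr 1
      rcases Nat.lt_or_ge q.2.2 b with h2 | h2 <;> simp [h2, Nat.min_def]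
    · simp only [List.foldl_cons, List.filter_cons, h, ih]
      simp

lemma foldl_min_le_init (L : List (Nat × (String × Nat))) :
    ∀ b, L.foldl (fun m iq => min m iq.2.2) b ≤ b := by
  induction L with
  | nil => intro b; simp
  | cons q t ih => intro b; exact le_trans (ih _) (Nat.min_le_left _ _)

lemma foldl_min_le_mem (L : List (Nat × (String × Nat))) :
    ∀ b q, q ∈ L → L.foldl (fun m iq => min m iq.2.2) b ≤ q.2.2 := by
  induction L with
  | nil => intro b q h; simp at h
  | cons q' t ih =>
    intro b q h
    rcases List.mem_cons.mp h with rfl | h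
    · exact le_trans (foldl_min_le_init t _) (Nat.min_le_right _ _)
    · exact ih _ _ h

lemma foldl_min_eq_or_mem (L : List (Nat × (String × Nat))) :
    ∀ b, L.foldl (fun m iq => min m iq.2.2) b = b ∨ ∃ q ∈ L, L.foldl (fun m iq => min m iq.2.2) b = q.2.2 := by
  induction L with
  | nil => intro b; left; rfl
  | cons q' t ih =>
    intro b
    rcases ih (min b q'.2.2) with h | ⟨q, hq, h⟩
    · rcases Nat.le_total b q'.2.2 with h2 | h2
      · left; simpa [Nat.min_eq_left h2] using h
      · right; exact ⟨q', List.mem_cons_self .., by simpa [Nat.min_eq_right h2] using h⟩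
    · right; exact ⟨q, List.mem_cons_of_mem _ hq, h⟩

-- bridge: a keyword matches somewhere among positions 0..len iff it is a substring
lemma hit_iff_isIn (pl : List Char) (kw : List Char) :
    (∃ i ∈ List.range (pl.length + 1), kw.isPrefixOf (pl.drop i) = true)
      ↔ PySem.Chars.isIn kw pl = true := by
  constructor
  · rintro ⟨i, _, h⟩
    exact (PySem.Chars.exists_prefix_drop_iff_isIn _ _).mp ⟨i, List.isPrefixOf_iff_prefix.mp h⟩
  · intro h
    rcases (PySem.Chars.exists_prefix_drop_iff_isIn _ _).mpr h with ⟨j, hj⟩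
    by_cases hlen : j ≤ pl.length
    · exact ⟨j, List.mem_range.mpr (by omega), List.isPrefixOf_iff_prefix.mpr hj⟩
    · have : pl.drop j = [] := List.drop_eq_nil_of_le (by omega)
      rw [this] at hj
      have : kw = [] := List.prefix_nil.mp hj
      exact ⟨0, List.mem_range.mpr (by omega), by simp [this]⟩

-- keywords of the table belong to their category's list
lemma mem_table_cat (pl : List Char) :
    ∀ q ∈ pvKw, PySem.Chars.isIn q.1.toList pl = true → pvF pl q.2 = true := by
  intro q hq
  fin_cases hq <;> (intro h; simp at h; simp [pvF]; tauto)

lemma table_prio_lt (q : String × Nat) (h : q ∈ pvKw) : q.2 < 10 := by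
  fin_cases h <;> decide

-- a true category yields a table entry that is a substring
lemma cat_to_mem (pl : List Char) (c : Nat) (h : pvF pl c = true) :
    ∃ q ∈ pvKw, q.2 = c ∧ PySem.Chars.isIn q.1.toList pl = true := by
  match c with
  | 0 | 1 | 2 | 3 | 4 | 5 | 6 | 7 | 8 | 9 =>
    simp [pvF] at h
    simp [pvKw]
    tauto
  | (n + 10) => simp [pvF] at h

lemma best_eq_min (pl : List Char) :
    pvBest pl = ((pvPairs pl).filter (pvHit pl)).foldl (fun m iq => min m iq.2.2) 10 := by
  have h := foldl_nest (α := Nat) (β := String × Nat) (γ := Nat)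
      (fun b i kq => if kq.2 < b ∧ kq.1.toList.isPrefixOf (pl.drop i) then kq.2 else b)
      (List.range (pl.length + 1)) pvKw 10
  have h2 := foldl_step_filter pl (pvPairs pl) 10
  unfold pvBest pvPairs at *
  simpa [pvRoles, pvHit] using h.trans h2

lemma best_le_of_cat (pl : List Char) (c : Nat) (h : pvF pl c = true) : pvBest pl ≤ c := by
  rcases cat_to_mem pl c h with ⟨q, hq, hc, hin⟩
  rcases (hit_iff_isIn pl q.1.toList).mpr hin with ⟨i, hi, hpre⟩
  have hmem : (i, q) ∈ (pvPairs pl).filter (pvHit pl) := by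
    refine List.mem_filter.mpr ⟨?_, by simpa [pvHit] using hpre⟩
    simp only [pvPairs, List.mem_flatMap, List.mem_map]
    exact ⟨i, hi, q, hq, rfl⟩
  rw [best_eq_min]
  simpa [hc] using foldl_min_le_mem _ 10 (i, q) hmem

lemma best_cases (pl : List Char) :
    pvBest pl = 10 ∨ (pvBest pl < 10 ∧ pvF pl (pvBest pl) = true) := by
  rw [best_eq_min]
  rcases foldl_min_eq_or_mem ((pvPairs pl).filter (pvHit pl)) 10 with h | ⟨q, hq, h⟩
  · left; exact h
  · right
    have hq' := List.mem_filter.mp hq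
    have hqP : q ∈ pvPairs pl := hq'.1
    have hhit : pvHit pl q = true := hq'.2
    simp only [pvPairs, List.mem_flatMap, List.mem_map] at hqP
    rcases hqP with ⟨i, hi, q', hq'', heq⟩
    subst heq
    have hin : PySem.Chars.isIn q'.1.toList pl = true :=
      (hit_iff_isIn pl q'.1.toList).mp ⟨i, hi, by simpa [pvHit] using hhit⟩
    have hf := mem_table_cat pl q' hq'' hin
    have hlt := table_prio_lt q' hq''
    constructor
    · rw [h]; simpa using hlt
    · rw [h]; simpa using hf

lemma firstIdx_char (f : Nat → Bool) (r : Nat)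
    (h1 : r = 10 ∨ (r < 10 ∧ f r = true))
    (h2 : ∀ c, f c = true → r ≤ c) :
    r = (if f 0 then 0 else if f 1 then 1 else if f 2 then 2 else if f 3 then 3
         else if f 4 then 4 else if f 5 then 5 else if f 6 then 6 else if f 7 then 7
         else if f 8 then 8 else if f 9 then 9 else 10) := by
  split_ifs with g0 g1 g2 g3 g4 g5 g6 g7 g8 g9
  · have := h2 0 g0; omega
  · have hk := h2 1 g1
    rcases h1 with rfl | ⟨hlt, hfr⟩
    · omega
    · interval_cases r <;> simp_all
  · have hk := h2 2 g2
    rcases h1 with rfl | ⟨hlt, hfr⟩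
    · omega
    · interval_cases r <;> simp_all
  · have hk := h2 3 g3
    rcases h1 with rfl | ⟨hlt, hfr⟩
    · omega
    · interval_cases r <;> simp_all
  · have hk := h2 4 g4
    rcases h1 with rfl | ⟨hlt, hfr⟩
    · omega
    · interval_cases r <;> simp_all
  · have hk := h2 5 g5
    rcases h1 with rfl | ⟨hlt, hfr⟩
    · omega
    · interval_cases r <;> simp_all
  · have hk := h2 6 g6
    rcases h1 with rfl | ⟨hlt, hfr⟩
    · omega
    · interval_cases r <;> simp_all
  · have hk := h2 7 g7
    rcases h1 with rfl | ⟨hlt, hfr⟩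
    · omega
    · interval_cases r <;> simp_all
  · have hk := h2 8 g8
    rcases h1 with rfl | ⟨hlt, hfr⟩
    · omega
    · interval_cases r <;> simp_all
  · have hk := h2 9 g9
    rcases h1 with rfl | ⟨hlt, hfr⟩
    · omega
    · interval_cases r <;> simp_all
  · rcases h1 with rfl | ⟨hlt, hfr⟩
    · rfl
    · interval_cases r <;> simp_all

lemma final10 : ∀ b0 b1 b2 b3 b4 b5 b6 b7 b8 b9 : Bool,
    (if (if b0 then 0 else if b1 then 1 else if b2 then 2 else if b3 then 3
         else if b4 then 4 else if b5 then 5 else if b6 then 6 else if b7 then 7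
         else if b8 then 8 else if b9 then 9 else 10) < 10
     then pvRoles.getD (if b0 then 0 else if b1 then 1 else if b2 then 2 else if b3 then 3
         else if b4 then 4 else if b5 then 5 else if b6 then 6 else if b7 then 7
         else if b8 then 8 else if b9 then 9 else 10) "source" else "source")
    = (if b0 then "test" else if b1 then "controller" else if b2 then "service"
       else if b3 then "model" else if b4 then "utility" else if b5 then "middleware"
       else if b6 then "config" else if b7 then "routing" else if b8 then "database"
       else if b9 then "ui-component" else "source") := by
  decide

-- ===== VERDICT (by name: the statement is the Claim_ definition above) =====
theorem classify_file_role_spec : Claim_equal_classify_file_role := by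
  intro path _
  unfold Spec_classify_file_role
  have hB : classify_file_role_alt path
      = if pvBest ((PySem.Str.lower path).toList) < 10
        then pvRoles.getD (pvBest ((PySem.Str.lower path).toList)) "source" else "source" := rfl
  have hA : classify_file_role path
      = (if pvF ((PySem.Str.lower path).toList) 0 then "test"
         else if pvF ((PySem.Str.lower path).toList) 1 then "controller"
         else if pvF ((PySem.Str.lower path).toList) 2 then "service"
         else if pvF ((PySem.Str.lower path).toList) 3 then "model"
         else if pvF ((PySem.Str.lower path).toList) 4 then "utility"
         else if pvF ((PySem.Str.lower path).toList) 5 then "middleware"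
         else if pvF ((PySem.Str.lower path).toList) 6 then "config"
         else if pvF ((PySem.Str.lower path).toList) 7 then "routing"
         else if pvF ((PySem.Str.lower path).toList) 8 then "database"
         else if pvF ((PySem.Str.lower path).toList) 9 then "ui-component"
         else "source") := by
    simp only [classify_file_role, PySem.Str.isIn_eq]
    rfl
  have hchain := firstIdx_char (pvF ((PySem.Str.lower path).toList)) (pvBest ((PySem.Str.lower path).toList))
      (best_cases _) (fun c h => best_le_of_cat _ c h)
  rw [hA, hB, hchain]
  exact (final10 _ _ _ _ _ _ _ _ _ _).symm
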